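-- pv_equiv track=rewrite | github.com/ZetaXiUpsilon/puzzle-git | 1D谜/di.py | calculate_gap
-- ===== SOURCE A (Python) =====
-- def calculate_gap(word):
--     """计算重复字母之间的间隔数"""
--     char_count = {}
--     positions = {}
--
--     # 记录每个字母的位置
--     for idx, char in enumerate(word):
--         if char not in positions:
--             positions[char] = []
--         positions[char].append(idx)
--
--     # 找到重复的字母
--     for char, pos_list in positions.items():
--         if len(pos_list) == 2:
--             return pos_list[1] - pos_list[0] - 1
--
--     # 如果没有找到重复对（理论上不会发生，因为已经通过is_valid_word检查）
--     return 0
-- ===== SOURCE B (Python) =====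
-- def calculate_gap(word):
--     """Recursive elimination over (index, char) pairs: look at the first remaining
--     pair; if its char has exactly one later occurrence, return the gap; otherwise
--     drop every pair with that char and continue. No dict is built."""
--     pairs = list(enumerate(word))
--     while pairs:
--         i, c = pairs[0]
--         occ = [j for j, d in pairs[1:] if d == c]
--         if len(occ) == 1:
--             return occ[0] - i - 1
--         pairs = [(j, d) for j, d in pairs[1:] if d != c]
--     return 0
-- ===== Notes on version B (the rewrite author's own statement) =====
-- stated objective: alternative
-- what changed: B builds no dict at all: it recursively eliminates over the list of (index, char) pairs, taking the first remaining pair, returning the gap if its char has exactly one later occurrence, and otherwise dropping every pair with that char before continuing.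
import Mathlib
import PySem

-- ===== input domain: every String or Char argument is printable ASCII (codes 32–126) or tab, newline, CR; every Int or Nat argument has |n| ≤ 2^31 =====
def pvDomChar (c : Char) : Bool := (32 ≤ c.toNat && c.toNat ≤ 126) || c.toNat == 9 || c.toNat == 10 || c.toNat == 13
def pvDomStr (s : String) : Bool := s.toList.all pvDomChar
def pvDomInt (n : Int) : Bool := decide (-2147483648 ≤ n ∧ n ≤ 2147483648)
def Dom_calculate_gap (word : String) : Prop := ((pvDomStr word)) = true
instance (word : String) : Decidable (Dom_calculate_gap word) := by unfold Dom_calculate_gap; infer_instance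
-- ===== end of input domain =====

-- B replaces A's dict of position lists by a recursive elimination over (index, char) pairs (no dict): alternative decomposition, same result.


-- ===== PORT A =====
-- A's first loop body: setdefault-style insert of [] for a fresh char, then append the index
def pvStepA (d : PySem.Dict Char (List Int)) (p : Int × Char) : PySem.Dict Char (List Int) :=
  let d := if d.contains p.2 = false then d.insert p.2 ([] : List Int) else d
  d.modify p.2 [] (fun l => l ++ [p.1])

-- A's second loop: first char whose position list has length 2 (pos_list[1]/pos_list[0] exact there)
def pvScanA : List (Char × List Int) → Int
  | [] => 0
  | (_, l) :: rest =>
    if l.length = 2 then PySem.List.pyGetD l 1 0 - PySem.List.pyGetD l 0 0 - 1 else pvScanA rest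

def calculate_gap (word : String) : Int :=
  let positions := (PySem.List.enumerate word.toList 0).foldl pvStepA PySem.Dict.empty
  pvScanA positions.items

-- ===== PORT B =====
-- B's while loop: inspect the first remaining (index, char) pair; if its char has exactly one
-- later occurrence return the gap, otherwise drop all pairs with that char and continue
def pvGo : List (Int × Char) → Int
  | [] => 0
  | (i, c) :: rest =>
    let occ := (rest.filter (fun p => p.2 == c)).map (fun p => p.1)
    if occ.length = 1 then PySem.List.pyGetD occ 0 0 - i - 1
    else pvGo (rest.filter (fun p => !(p.2 == c)))
termination_by l => l.length
decreasing_by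
  simp only [List.length_cons, List.length_unattach]
  exact Nat.lt_succ_of_le (le_trans (List.length_filter_le _ _) (by simp))

def calculate_gap_alt (word : String) : Int :=
  pvGo (PySem.List.enumerate word.toList 0)

-- ===== PRECONDITION & SPEC =====
def Spec_calculate_gap (word : String) (out : Int) : Prop := out = calculate_gap_alt word
instance (word : String) (out : Int) : Decidable (Spec_calculate_gap word out) := by unfold Spec_calculate_gap; infer_instance

-- ===== CLAIM (what is proved, stated in full; the proofs are below) =====
def Claim_equal_calculate_gap : Prop := ∀ (word : String), Dom_calculate_gap word → Spec_calculate_gap word (calculate_gap word)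

-- ===== LEMMAS AND PROOFS =====

-- ofList (dedup keeping first occurrences) commutes with filter
lemma pv_filter_ofList (p : Char → Bool) (xs : List Char) :
    (PySem.Set.ofList xs).filter p = PySem.Set.ofList (xs.filter p) := by
  induction xs with
  | nil => rfl
  | cons x xs ih =>
    rw [PySem.Set.ofList_cons]
    by_cases hx : p x = true
    · conv_rhs => rw [List.filter_cons_of_pos hx, PySem.Set.ofList_cons]
      conv_lhs => rw [List.filter_cons_of_pos hx]
      simp only [List.cons.injEq, true_and]
      show ((PySem.Set.ofList xs).filter (fun y => !(y == x))).filter p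
        = (PySem.Set.ofList (xs.filter p)).filter (fun y => !(y == x))
      rw [← ih, List.filter_filter, List.filter_filter]
      congr 1
      funext a
      exact Bool.and_comm _ _
    · conv_rhs => rw [List.filter_cons_of_neg hx]
      conv_lhs => rw [List.filter_cons_of_neg hx]
      show ((PySem.Set.ofList xs).filter (fun y => !(y == x))).filter p
        = PySem.Set.ofList (xs.filter p)
      rw [← ih, List.filter_filter]
      congr 1
      funext a
      by_cases ha : a = x
      · subst ha
        simp only [Bool.not_eq_true] at hx
        simp [hx]
      · simp [ha]

-- A's loop body IS the one-line modify
lemma pv_stepA_eq (d : PySem.Dict Char (List Int)) (p : Int × Char) :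
    pvStepA d p = d.modify p.2 [] (fun l => l ++ [p.1]) := by
  by_cases hc : d.contains p.2 = true
  · simp [pvStepA, hc]
  · have hc' : d.contains p.2 = false := by simpa using hc
    simp [pvStepA, hc', PySem.Dict.modify, PySem.Dict.getD_insert_self,
      PySem.Dict.insert_insert_self, PySem.Dict.getD_of_not_contains d ([] : List Int) hc']

-- characterization of A's dict: items = chars in first-appearance order, each with its position list
lemma pv_items_eq (ps : List (Int × Char)) :
    ((ps.foldl pvStepA PySem.Dict.empty).items)
      = (PySem.Set.ofList (ps.map (fun p => p.2))).map
          (fun c => (c, (ps.filter (fun p => p.2 == c)).map (fun p => p.1))) := by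
  have hstep : pvStepA = fun d p => d.modify p.2 [] (fun l => l ++ [p.1]) :=
    funext fun d => funext fun p => pv_stepA_eq d p
  have hswap : ps.foldl (fun d p => d.modify p.2 [] (fun l => l ++ [p.1])) PySem.Dict.empty
      = (ps.map Prod.swap).foldl
          (fun (d : PySem.Dict Char (List Int)) q => d.modify q.1 [] (fun l => l ++ [q.2]))
          PySem.Dict.empty := by
    rw [List.foldl_map]
    simp only [Prod.fst_swap, Prod.snd_swap]
  rw [hstep, hswap]
  set D := (ps.map Prod.swap).foldl
      (fun (d : PySem.Dict Char (List Int)) q => d.modify q.1 [] (fun l => l ++ [q.2]))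
      PySem.Dict.empty with hD
  have hkeys : D.keys = PySem.Set.ofList (ps.map (fun p => p.2)) := by
    rw [hD, PySem.Dict.keys_foldl_modify_key (ps.map Prod.swap) Prod.fst []
      (fun _ q => fun l => l ++ [q.2]) PySem.Dict.empty]
    simp [PySem.Set.update_nil_left, List.map_map, Function.comp_def, Prod.swap]
  have hnd : D.keys.Nodup := by
    rw [hD]
    exact PySem.Dict.nodup_keys_foldl_modify_key _ _ _ _ _ (by simp [PySem.Dict.keys_empty])
  have hget : ∀ c : Char, D.getD c [] = (ps.filter (fun p => p.2 == c)).map (fun p => p.1) := by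
    intro c
    rw [hD, PySem.Dict.getD_foldl_modify_append (ps.map Prod.swap) PySem.Dict.empty c]
    simp [List.filter_map, List.map_map, Function.comp_def, Prod.swap,
      PySem.Dict.getD_empty]
  rw [PySem.Dict.items_eq_map_keys D hnd [], hkeys]
  exact List.map_congr_left (fun c _ => by rw [hget c])

-- A's scan over that characterization IS B's recursion (strong induction on the pair list)
lemma pv_scan_aux (n : Nat) : ∀ ps : List (Int × Char), ps.length ≤ n →
    pvScanA ((PySem.Set.ofList (ps.map (fun p => p.2))).map
        (fun c => (c, (ps.filter (fun p => p.2 == c)).map (fun p => p.1)))) = pvGo ps := by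
  induction n with
  | zero =>
    intro ps hps
    have : ps = [] := List.length_eq_zero_iff.mp (Nat.le_zero.mp hps)
    subst this
    rw [pvGo]
    rfl
  | succ n ih =>
    intro ps hps
    match ps with
    | [] => rw [pvGo]; rfl
    | (i, c) :: rest =>
      rw [pvGo]
      simp only [List.map_cons, PySem.Set.ofList_cons]
      rw [pvScanA]
      by_cases hocc : ((rest.filter (fun p => p.2 == c)).map (fun p => p.1)).length = 1
      · -- exactly one later occurrence: both return the gap
        obtain ⟨j, hj⟩ := List.length_eq_one_iff.mp hocc
        simp [hj, PySem.List.pyGetD]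

      · -- not a pair: A skips this key, B drops all pairs with this char
        have hlen : ¬ (((i, c).1 :: (rest.filter (fun p => p.2 == c)).map (fun p => p.1)).length = 2) := by
          simp only [List.length_cons]
          omega
        rw [if_neg (by simpa using hlen), if_neg hocc]
        have hset : (PySem.Set.ofList (rest.map (fun p => p.2))).discard c
            = PySem.Set.ofList ((rest.filter (fun p => !(p.2 == c))).map (fun p => p.2)) := by
          show (PySem.Set.ofList (rest.map (fun p => p.2))).filter (fun y => !(y == c)) = _
          rw [pv_filter_ofList, List.filter_map]
          rfl
        have hrec := ih (rest.filter (fun p => !(p.2 == c)))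
          (le_trans (List.length_filter_le _ _) (by simpa using Nat.le_of_succ_le_succ hps))
        rw [hset, ← hrec]
        congr 1
        refine List.map_congr_left (fun c' hc' => ?_)
        have hne : c' ≠ c := by
          have hm : c' ∈ (rest.filter (fun p => !(p.2 == c))).map (fun p => p.2) :=
            (PySem.Set.mem_ofList _ _).mp hc'
          obtain ⟨q, hq, rfl⟩ := List.mem_map.mp hm
          simpa using List.of_mem_filter hq
        have hhead : (((i, c) :: rest).filter (fun p => p.2 == c'))
            = rest.filter (fun p => p.2 == c') := by
          rw [List.filter_cons_of_neg (by simp [Ne.symm hne])]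
        have hfilter : (rest.filter (fun p => !(p.2 == c))).filter (fun p => p.2 == c')
            = rest.filter (fun p => p.2 == c') := by
          rw [List.filter_filter]
          congr 1
          funext q
          by_cases hq : q.2 = c'
          · simp [hq, hne]
          · simp [hq]
        rw [hhead, hfilter]

-- ===== VERDICT (by name: the statement is the Claim_ definition above) =====
theorem calculate_gap_spec : Claim_equal_calculate_gap := by
  intro word _
  unfold Spec_calculate_gap calculate_gap calculate_gap_alt
  dsimp only
  rw [pv_items_eq, pv_scan_aux (PySem.List.enumerate word.toList 0).length _ le_rfl]
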